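-- pv_equiv track=rewrite | github.com/pull-ups/VisEscape-demo | evaluation/get_score.py | get_solved_hints_num
-- ===== SOURCE A (Python) =====
-- def get_solved_hints_num(hint_messages: list) -> int:
--     num = 0
--     hint_received = False
--
--     for hint_message in hint_messages:
--         if hint_message != "":
--             hint_received = True
--         else:
--             if hint_received:
--                 num += 1
--                 hint_received = False
--     return num
-- ===== SOURCE B (Python) =====
-- def get_solved_hints_num(hint_messages: list) -> int:
--     # A terminated hint group is exactly an adjacent pair (non-empty, empty):
--     # consecutive empties collapse and a trailing non-empty run has no pair.
--     return sum(1 for prev, cur in zip(hint_messages, hint_messages[1:])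
--                if prev != "" and cur == "")
-- ===== Notes on version B (the rewrite author's own statement) =====
-- stated objective: idiomatic
-- what changed: Replaces the stateful loop with a flag by a single comprehension counting adjacent (non-empty, empty) pairs via zip of the list with its tail.
import Mathlib
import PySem

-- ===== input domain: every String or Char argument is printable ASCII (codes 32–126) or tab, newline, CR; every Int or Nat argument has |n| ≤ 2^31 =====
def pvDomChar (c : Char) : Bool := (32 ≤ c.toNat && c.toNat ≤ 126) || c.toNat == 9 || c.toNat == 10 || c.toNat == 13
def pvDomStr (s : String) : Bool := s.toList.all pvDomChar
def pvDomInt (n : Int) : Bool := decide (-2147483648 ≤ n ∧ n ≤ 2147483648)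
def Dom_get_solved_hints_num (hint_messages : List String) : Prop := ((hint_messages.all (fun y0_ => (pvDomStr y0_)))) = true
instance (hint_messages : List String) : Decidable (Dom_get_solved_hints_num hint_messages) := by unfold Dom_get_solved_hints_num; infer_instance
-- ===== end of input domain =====

-- B replaces A's stateful flag loop by counting adjacent (non-empty, empty) pairs (idiomatic).

-- ===== PORT A =====
-- the loop body, on state (num, hint_received)
def pvStepA (st : Int × Bool) (hint_message : String) : Int × Bool :=
  if hint_message ≠ "" then (st.1, true)
  else if st.2 then (st.1 + 1, false) else (st.1, false)

def get_solved_hints_num (hint_messages : List String) : Int :=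
  (hint_messages.foldl pvStepA ((0 : Int), false)).1

-- ===== PORT B =====
-- zip(hint_messages, hint_messages[1:]) with sum(1 for … if …) ported as countP;
-- the [1:] slice on a list is exactly drop 1
def get_solved_hints_num_alt (hint_messages : List String) : Int :=
  ((hint_messages.zip (hint_messages.drop 1)).countP
    (fun p => p.1 != "" && p.2 == "") : Nat)

-- ===== PRECONDITION & SPEC =====
def Spec_get_solved_hints_num (hint_messages : List String) (out : Int) : Prop := out = get_solved_hints_num_alt hint_messages
instance (hint_messages : List String) (out : Int) : Decidable (Spec_get_solved_hints_num hint_messages out) := by unfold Spec_get_solved_hints_num; infer_instance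

-- ===== CLAIM (what is proved, stated in full; the proofs are below) =====
def Claim_equal_get_solved_hints_num : Prop := ∀ (hint_messages : List String), Dom_get_solved_hints_num hint_messages → Spec_get_solved_hints_num hint_messages (get_solved_hints_num hint_messages)

-- ===== LEMMAS AND PROOFS =====

-- number of terminated groups in xs, given whether a non-empty message is pending (flag b)
def pvPC (b : Bool) : List String → Nat
  | [] => 0
  | y :: ys => (if b ∧ y = "" then 1 else 0) + pvPC (y ≠ "") ys

theorem pvFoldA_eq_pvPC (xs : List String) (n : Int) (b : Bool) :
    (xs.foldl pvStepA (n, b)).1 = n + (pvPC b xs : Int) := by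
  induction xs generalizing n b with
  | nil => simp [pvPC]
  | cons x xs ih =>
    rw [List.foldl_cons]
    by_cases hx : x = ""
    · subst hx
      cases b
      · rw [show pvStepA (n, false) "" = (n, false) from by simp [pvStepA], ih]
        simp [pvPC]
      · rw [show pvStepA (n, true) "" = (n + 1, false) from by simp [pvStepA], ih]
        simp [pvPC]; ring
    · rw [show pvStepA (n, b) x = (n, true) from by simp [pvStepA, hx], ih]
      simp [pvPC, hx]

theorem pvZip_eq_pvPC (xs : List String) (s : String) :
    ((s :: xs).zip xs).countP (fun p => p.1 != "" && p.2 == "") = pvPC (s ≠ "") xs := by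
  induction xs generalizing s with
  | nil => simp [pvPC]
  | cons y ys ih =>
    simp only [List.zip_cons_cons, List.countP_cons, ih y, pvPC]
    by_cases hs : s = "" <;> by_cases hy : y = "" <;>
      simp [hs, hy] <;> omega

-- ===== VERDICT (by name: the statement is the Claim_ definition above) =====
theorem get_solved_hints_num_spec : Claim_equal_get_solved_hints_num := by
  intro xs _
  show get_solved_hints_num xs = get_solved_hints_num_alt xs
  unfold get_solved_hints_num get_solved_hints_num_alt
  rw [pvFoldA_eq_pvPC]
  cases xs with
  | nil => simp [pvPC]
  | cons x xs =>
    rw [show (x :: xs).drop 1 = xs from rfl, pvZip_eq_pvPC]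
    simp [pvPC, decide_not]
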